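-- pv_equiv track=rewrite | github.com/VeeraaVikash/cyberbullying-detection | data/predict_comprehensive.py | detect_double_negative
-- ===== SOURCE A (Python) =====
-- def detect_double_negative(text):
--     """
--     Detect 'not + negative word' patterns
--     Examples: "not a bad guy", "not ugly", "not terrible"
--     """
--     negative_words = [
--         'bad', 'terrible', 'awful', 'horrible', 'stupid', 'dumb',
--         'ugly', 'hate', 'mean', 'cruel', 'evil', 'nasty', 'trash',
--         'loser', 'worthless', 'useless', 'pathetic', 'disgusting'
--     ]
--
--     text_lower = text.lower()
--     words = text_lower.split()
--
--     for i in range(len(words)-1):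
--         if words[i] in ['not', "isn't", "isnt", "aren't", "arent"]:
--             # Check next 1-3 words
--             window = words[i+1:min(i+4, len(words))]
--
--             for neg_word in negative_words:
--                 if neg_word in window:
--                     # Double negative detected
--                     return True, "double_negative"
--
--     return False, None
-- ===== SOURCE B (Python) =====
-- NEGATIVE_WORDS = frozenset([
--     'bad', 'terrible', 'awful', 'horrible', 'stupid', 'dumb',
--     'ugly', 'hate', 'mean', 'cruel', 'evil', 'nasty', 'trash',
--     'loser', 'worthless', 'useless', 'pathetic', 'disgusting'
-- ])
--
-- NEGATIONS = frozenset(['not', "isn't", 'isnt', "aren't", 'arent'])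
--
--
-- def detect_double_negative(text):
--     """Single pass: remember the index of the most recent negation word;
--     a negative word within 1-3 positions after it is a double negative."""
--     last_neg = -10
--     for i, word in enumerate(text.lower().split()):
--         if word in NEGATIVE_WORDS and 1 <= i - last_neg <= 3:
--             return True, "double_negative"
--         if word in NEGATIONS:
--             last_neg = i
--     return False, None
-- ===== Notes on version B (the rewrite author's own statement) =====
-- stated objective: alternative
-- what changed: Replaced the index loop with forward window slicing and an inner scan over the negative-word list by a single state-maintaining pass that remembers the index of the most recent negation word and fires on a negative word at distance 1-3, with set membership instead of list scans.
import Mathlib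
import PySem

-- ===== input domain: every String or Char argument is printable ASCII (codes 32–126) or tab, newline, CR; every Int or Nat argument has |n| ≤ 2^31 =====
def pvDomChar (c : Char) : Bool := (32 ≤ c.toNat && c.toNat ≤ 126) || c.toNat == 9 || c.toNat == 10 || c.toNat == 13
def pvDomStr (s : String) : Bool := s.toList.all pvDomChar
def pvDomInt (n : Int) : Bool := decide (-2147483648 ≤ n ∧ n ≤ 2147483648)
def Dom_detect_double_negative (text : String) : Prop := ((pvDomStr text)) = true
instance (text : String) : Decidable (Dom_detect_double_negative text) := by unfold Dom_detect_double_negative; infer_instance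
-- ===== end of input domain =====

-- B replaces A's index loop + forward window slice + inner scan over the negative-word list by a
-- single pass remembering the most recent negation index (objective: alternative decomposition).


-- ===== PORT A =====
def pvNegativeWords : List String :=
  ["bad", "terrible", "awful", "horrible", "stupid", "dumb",
   "ugly", "hate", "mean", "cruel", "evil", "nasty", "trash",
   "loser", "worthless", "useless", "pathetic", "disgusting"]

-- the outer 'for i in range(len(words)-1)' with its early return
def pvLoopA (words : List String) : List Int → Bool × Option String
  | [] => (false, none)
  | i :: rest =>
      -- words[i] is always in range here; pyGetD is exact on that domain
      if PySem.List.pyGetD words i "" ∈ ["not", "isn't", "isnt", "aren't", "arent"] then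
        let window := PySem.List.slice words (some (i + 1))
          (some (min (i + 4) ((words.length : Int))))
        -- 'for neg_word in negative_words: if neg_word in window: return …'
        if pvNegativeWords.any (fun neg_word => window.contains neg_word) then
          (true, some "double_negative")
        else pvLoopA words rest
      else pvLoopA words rest

def detect_double_negative (text : String) : Bool × Option String :=
  let text_lower := PySem.Str.lower text
  let words := PySem.Str.split₀ text_lower
  pvLoopA words (PySem.List.pyRange 0 ((words.length : Int) - 1) 1)

-- ===== PORT B =====
def pvAltNegativeSet : PySem.Set String :=
  PySem.Set.ofList
    ["bad", "terrible", "awful", "horrible", "stupid", "dumb",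
     "ugly", "hate", "mean", "cruel", "evil", "nasty", "trash",
     "loser", "worthless", "useless", "pathetic", "disgusting"]

def pvAltNegationSet : PySem.Set String :=
  PySem.Set.ofList ["not", "isn't", "isnt", "aren't", "arent"]

-- the 'for i, word in enumerate(...)' loop carrying last_neg
def pvScanB : List (Int × String) → Int → Bool × Option String
  | [], _ => (false, none)
  | (i, word) :: rest, last_neg =>
      if pvAltNegativeSet.contains word && decide (1 ≤ i - last_neg) && decide (i - last_neg ≤ 3) then
        (true, some "double_negative")
      else pvScanB rest (if pvAltNegationSet.contains word then i else last_neg)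

def detect_double_negative_alt (text : String) : Bool × Option String :=
  pvScanB (PySem.List.enumerate (PySem.Str.split₀ (PySem.Str.lower text)) 0) (-10)

-- ===== PRECONDITION & SPEC =====
def Spec_detect_double_negative (text : String) (out : Bool × Option String) : Prop := out = detect_double_negative_alt text
instance (text : String) (out : Bool × Option String) : Decidable (Spec_detect_double_negative text out) := by unfold Spec_detect_double_negative; infer_instance

-- ===== CLAIM (what is proved, stated in full; the proofs are below) =====
def Claim_equal_detect_double_negative : Prop := ∀ (text : String), Dom_detect_double_negative text → Spec_detect_double_negative text (detect_double_negative text)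

-- ===== LEMMAS AND PROOFS =====

-- common intermediate spec: pvSpecF ws = "some negation word is followed within 3 words by a negative word"
def pvHit : List String → Nat → Bool
  | [], _ => false
  | w :: rest, c => if c = 0 then false else (pvNegativeWords.contains w || pvHit rest (c - 1))

def pvSpecF : List String → Bool
  | [] => false
  | w :: rest => (decide (w ∈ ["not", "isn't", "isnt", "aren't", "arent"]) && pvHit rest 3) || pvSpecF rest

def pvPairOf (b : Bool) : Bool × Option String :=
  if b then (true, some "double_negative") else (false, none)

theorem pvHit_zero (ws : List String) : pvHit ws 0 = false := by
  cases ws <;> simp [pvHit]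

theorem pvHit_or_le (ws : List String) : ∀ c d : Nat, c ≤ d → (pvHit ws c || pvHit ws d) = pvHit ws d := by
  induction ws with
  | nil => intro c d _; simp [pvHit]
  | cons w rest ih =>
      intro c d hcd
      by_cases hc : c = 0
      · simp [hc, pvHit_zero]
      · have hd : d ≠ 0 := by omega
        simp only [pvHit, if_neg hc, if_neg hd]
        have := ih (c - 1) (d - 1) (by omega)
        cases hw : pvNegativeWords.contains w <;> simp_all

theorem pvAltNegativeSet_eq : pvAltNegativeSet = pvNegativeWords := by decide

theorem pvAltNegationSet_eq : pvAltNegationSet = ["not", "isn't", "isnt", "aren't", "arent"] := by decide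

-- swap the two membership scans: A tests each negative word against the window
theorem pvAny_contains_comm (L M : List String) :
    (L.any fun a => M.contains a) = (M.any fun b => L.contains b) := by
  rcases h : M.any fun b => L.contains b with _ | _
  · simp only [List.any_eq_false] at h ⊢
    intro a ha hc
    exact h a (by simpa using hc) (by simpa using ha)
  · simp only [List.any_eq_true] at h ⊢
    obtain ⟨b, hbM, hbL⟩ := h
    exact ⟨b, by simpa using hbL, by simpa using hbM⟩

-- A's window check is pvHit of the next three words
theorem pvWindow_eq_hit (ws : List String) (c : Nat) :
    (pvNegativeWords.any fun nw => (ws.take c).contains nw) = pvHit ws c := by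
  rw [pvAny_contains_comm]
  induction ws generalizing c with
  | nil => simp [pvHit]
  | cons w rest ih =>
      by_cases hc : c = 0
      · simp [hc, pvHit]
      · obtain ⟨c', rfl⟩ : ∃ c', c = c' + 1 := ⟨c - 1, by omega⟩
        have h : ((List.take c' rest).any fun b => decide (b ∈ pvNegativeWords)) = pvHit rest c' := by
          simpa using ih c'
        simp [pvHit, h]

-- ===== A-side: the index loop computes pvSpecF =====
theorem pvLoopA_spec (ws : List String) : ∀ k : Nat,
    pvLoopA ws (PySem.List.pyRange (k : Int) ((ws.length : Int) - 1) 1) = pvPairOf (pvSpecF (ws.drop k)) := by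
  intro k
  induction hd : ws.length - k generalizing k with
  | zero =>
      rw [PySem.List.pyRange_one_eq_nil (by omega), List.drop_eq_nil_of_le (by omega)]
      simp [pvLoopA, pvSpecF, pvPairOf]
  | succ d ih =>
      by_cases hlast : ws.length = k + 1
      · -- last word: empty range, pvSpecF of a singleton is false
        rw [PySem.List.pyRange_one_eq_nil (by omega)]
        have h1 : ws.drop k = ws[k] :: ws.drop (k + 1) := List.drop_eq_getElem_cons (by omega)
        have h2 : ws.drop (k + 1) = [] := List.drop_eq_nil_of_le (by omega)
        simp [pvLoopA, h1, h2, pvSpecF, pvHit, pvPairOf]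
      · have hk : k < ws.length - 1 := by omega
        have hk' : k < ws.length := by omega
        rw [PySem.List.pyRange_one_cons (by omega)]
        have hdrop : ws.drop k = ws[k] :: ws.drop (k + 1) := List.drop_eq_getElem_cons hk'
        have hget : PySem.List.pyGetD ws (k : Int) "" = ws[k] := by
          rw [PySem.List.pyGetD_natCast]; exact List.getD_eq_getElem ws "" hk'
        have hslice : PySem.List.slice ws (some ((k : Int) + 1))
            (some (min ((k : Int) + 4) ((ws.length : Int)))) = (ws.drop (k + 1)).take 3 := by
          have h1 : ((k : Int) + 1) = ((k + 1 : Nat) : Int) := by push_cast; ring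
          have h2 : min ((k : Int) + 4) ((ws.length : Int)) = ((min (k + 4) ws.length : Nat) : Int) := by
            push_cast; omega
          rw [h1, h2, PySem.List.slice_natCast]
          by_cases hbig : k + 4 ≤ ws.length
          · have : min (k + 4) ws.length - (k + 1) = 3 := by omega
            rw [this]
          · have hlen : (ws.drop (k + 1)).length ≤ 3 := by simp; omega
            rw [List.take_of_length_le (by simp; omega), List.take_of_length_le hlen]
        have hrec := ih (k + 1) (by omega)
        have hc : ((k : Int) + 1) = (((k + 1 : Nat)) : Int) := by push_cast; ring
        rw [pvLoopA, hget, hslice, hc, hrec, hdrop]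
        have hw := pvWindow_eq_hit (ws.drop (k + 1)) 3
        by_cases hneg : ws[k] ∈ ["not", "isn't", "isnt", "aren't", "arent"]
        · rw [if_pos hneg]
          simp only [pvSpecF, hneg, decide_true, Bool.true_and]
          rcases hhit : pvHit (ws.drop (k + 1)) 3 with _ | _
          · rw [if_neg (by rw [hw, hhit]; simp)]; simp [pvPairOf]
          · rw [if_pos (by rw [hw, hhit])]; simp [pvPairOf]
        · rw [if_neg hneg]
          simp [pvSpecF, hneg]

-- ===== B-side: the single pass computes pvSpecF through a coverage counter =====
def pvCover : List String → Nat → Bool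
  | [], _ => false
  | w :: rest, c =>
      (pvNegativeWords.contains w && decide (0 < c)) ||
        pvCover rest (if w ∈ ["not", "isn't", "isnt", "aren't", "arent"] then 3 else c - 1)

theorem pvScanB_cover (ws : List String) : ∀ (s last_neg : Int), last_neg < s →
    pvScanB (PySem.List.enumerate ws s) last_neg = pvPairOf (pvCover ws (last_neg + 4 - s).toNat) := by
  induction ws with
  | nil => intro s l _; simp [PySem.List.enumerate_nil, pvScanB, pvCover, pvPairOf]
  | cons w rest ih =>
      intro s l hl
      rw [PySem.List.enumerate_cons, pvScanB]
      have h1 : decide (1 ≤ s - l) = true := by simp; omega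
      have hmemNW : pvAltNegativeSet.contains w = pvNegativeWords.contains w := by
        rw [pvAltNegativeSet_eq]; simp
      have hmemNG : pvAltNegationSet.contains w =
          decide (w ∈ ["not", "isn't", "isnt", "aren't", "arent"]) := by
        rw [pvAltNegationSet_eq]; simp
      by_cases hfire : pvNegativeWords.contains w = true ∧ s - l ≤ 3
      · rw [if_pos (by rw [hmemNW, hfire.1, h1]; simp; omega)]
        have : pvCover (w :: rest) (l + 4 - s).toNat = true := by
          rw [pvCover, hfire.1]
          simp only [Bool.true_and, Bool.or_eq_true]
          left; simp; omega
        rw [this]; rfl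
      · rw [if_neg (by
          intro hc
          simp only [Bool.and_eq_true, decide_eq_true_eq] at hc
          exact hfire ⟨by rw [← hmemNW]; exact hc.1.1, hc.2⟩)]
        rw [pvCover]
        have hnofire : (pvNegativeWords.contains w && decide (0 < (l + 4 - s).toNat)) = false := by
          rcases hw : pvNegativeWords.contains w with _ | _
          · simp
          · simp only [Bool.true_and, decide_eq_false_iff_not]
            intro h; exact hfire ⟨hw, by omega⟩
        rw [hnofire, Bool.false_or]
        by_cases hng : w ∈ ["not", "isn't", "isnt", "aren't", "arent"]
        · rw [if_pos (by rw [hmemNG]; exact decide_eq_true hng), if_pos hng, ih (s + 1) s (by omega)]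
          have : (s + 4 - (s + 1)).toNat = 3 := by omega
          rw [this]
        · rw [if_neg (by rw [hmemNG]; simp only [decide_eq_true_eq]; exact hng), if_neg hng,
            ih (s + 1) l (by omega)]
          have : (l + 4 - (s + 1)).toNat = (l + 4 - s).toNat - 1 := by omega
          rw [this]

theorem pvCover_spec (ws : List String) : ∀ c : Nat, c ≤ 3 →
    pvCover ws c = (pvSpecF ws || pvHit ws c) := by
  induction ws with
  | nil => intro c _; simp [pvCover, pvSpecF, pvHit]
  | cons w rest ih =>
      intro c hc
      rw [pvCover, pvSpecF]
      by_cases hng : w ∈ ["not", "isn't", "isnt", "aren't", "arent"]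
      · rw [if_pos hng, ih 3 (by omega)]
        simp only [hng, decide_true, Bool.true_and]
        rcases hw : pvNegativeWords.contains w with _ | _
        · simp only [Bool.false_and, Bool.false_or]
          by_cases hc0 : c = 0
          · simp [hc0, pvHit]
            cases pvHit rest 3 <;> cases pvSpecF rest <;> simp
          · simp only [pvHit, if_neg hc0, hw, Bool.false_or]
            have hmono := pvHit_or_le rest (c - 1) 3 (by omega)
            cases h3 : pvHit rest 3 <;> cases hcm : pvHit rest (c - 1) <;>
              cases pvSpecF rest <;> simp_all
        · by_cases hc0 : c = 0
          · simp [hc0, pvHit]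
            cases pvHit rest 3 <;> cases pvSpecF rest <;> simp
          · simp only [Bool.true_and, pvHit, if_neg hc0, hw, Bool.true_or]
            simp
            exact Or.inl (by omega)
      · rw [if_neg hng, ih (c - 1) (by omega)]
        simp only [hng, decide_false, Bool.false_and, Bool.false_or]
        by_cases hc0 : c = 0
        · simp [hc0, pvHit_zero]
        · simp only [pvHit, if_neg hc0]
          rcases hw : pvNegativeWords.contains w with _ | _
          · simp
          · simp
            exact Or.inl (by omega)

theorem pvPorts_agree (ws : List String) :
    pvLoopA ws (PySem.List.pyRange 0 ((ws.length : Int) - 1) 1) =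
      pvScanB (PySem.List.enumerate ws 0) (-10) := by
  have hA := pvLoopA_spec ws 0
  have hB := pvScanB_cover ws 0 (-10) (by omega)
  have hc : ((-10 : Int) + 4 - 0).toNat = 0 := by omega
  rw [Int.ofNat_zero] at hA
  rw [hA, hB, hc, pvCover_spec ws 0 (by omega), pvHit_zero, Bool.or_false]
  simp

-- ===== VERDICT (by name: the statement is the Claim_ definition above) =====
theorem detect_double_negative_spec : Claim_equal_detect_double_negative := by
  intro text _
  unfold Spec_detect_double_negative detect_double_negative detect_double_negative_alt
  exact pvPorts_agree (PySem.Str.split₀ (PySem.Str.lower text))
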